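-- pv_equiv track=rewrite | github.com/RGZ1890/codetree-TILs | 241007/고대 문명 유적 탐사/ancient-ruin-exploration.py | count_clear
-- ===== SOURCE A (Python) =====
-- def BFS(board, visited, i, j, is_clear):
--     q = []
--     cnt = 0
--     pos = set()
--     q.append((i, j))
--     pos.add((i, j))
--     visited[i][j] = 1
--     cnt += 1
--
--     while q:
--         crow, ccol = q.pop(0)
--         for dir in ((-1, 0), (0, 1), (1, 0), (0, -1)):
--             nrow, ncol = crow + dir[0], ccol + dir[1]
--             if 0 <= nrow < 5 and 0 <= ncol < 5 \
--                     and visited[nrow][ncol] == 0 \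
--                     and board[crow][ccol] == board[nrow][ncol]:
--                 q.append((nrow, ncol))
--                 visited[nrow][ncol] = 1
--                 pos.add((nrow, ncol))
--                 cnt += 1
--     if cnt >= 3:
--         if is_clear:
--             for r, c in pos:
--                 board[r][c] = 0
--         return cnt
--
--     return 0
--
-- def count_clear(board, is_clear):
--     visited = [[0] * 5 for _ in range(5)]
--     cnt = 0
--     for i in range(5):
--         for j in range(5):
--             if visited[i][j] == 0:
--                 cnt += BFS(board, visited, i, j, is_clear)
--     return cnt
-- ===== SOURCE B (Python) =====
-- def count_clear(board, is_clear):
--     # Connected-component labeling by synchronous min-label propagation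
--     # (mutates board exactly like A when is_clear: cells of components of size >= 3 are zeroed).
--     label = list(range(25))
--     for _ in range(25):
--         new = []
--         for r in range(5):
--             for c in range(5):
--                 m = label[5 * r + c]
--                 for nr, nc in ((r - 1, c), (r, c + 1), (r + 1, c), (r, c - 1)):
--                     if 0 <= nr < 5 and 0 <= nc < 5 and board[r][c] == board[nr][nc]:
--                         m = min(m, label[5 * nr + nc])
--                 new.append(m)
--         label = new
--     size = {}
--     for l in label:
--         size[l] = size.get(l, 0) + 1
--     total = 0
--     for r in range(5):
--         for c in range(5):
--             if size[label[5 * r + c]] >= 3: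
--                 total += 1
--                 if is_clear:
--                     board[r][c] = 0
--     return total
-- ===== Notes on version B (the rewrite author's own statement) =====
-- stated objective: alternative
-- what changed: A's visited-array scan with a BFS flood fill per region is replaced by synchronous min-label propagation (connected-component labeling): 25 rounds of pulling the minimum label from equal-valued neighbours, then counting label frequencies to find the cells in regions of size >= 3.
import Mathlib
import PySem

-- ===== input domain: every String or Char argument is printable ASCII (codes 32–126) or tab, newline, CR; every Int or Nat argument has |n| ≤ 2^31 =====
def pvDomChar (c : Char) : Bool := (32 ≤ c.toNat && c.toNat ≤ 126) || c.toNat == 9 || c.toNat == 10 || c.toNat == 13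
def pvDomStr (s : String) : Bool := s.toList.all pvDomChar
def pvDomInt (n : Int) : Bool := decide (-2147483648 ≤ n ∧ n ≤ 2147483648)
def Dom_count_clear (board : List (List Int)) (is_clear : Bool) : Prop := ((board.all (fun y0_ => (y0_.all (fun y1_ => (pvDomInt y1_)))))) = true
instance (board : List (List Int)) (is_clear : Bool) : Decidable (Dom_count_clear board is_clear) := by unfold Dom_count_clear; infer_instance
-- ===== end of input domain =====

-- B replaces A's visited-scan + BFS flood fill by synchronous min-label propagation
-- (connected-component labeling); same return value, and the same in-place clearing of
-- `board` (both ports thread the board and perform the writes; equivalence is about the return value).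

-- grid read g[r][c] (all uses are guarded in range on Pre_); and write g[r][c] = v
def pvGet2 (g : List (List Int)) (r c : Int) : Int :=
  PySem.List.pyGetD (PySem.List.pyGetD g r []) c 0

def pvSet2 (g : List (List Int)) (r c : Int) (v : Int) : List (List Int) :=
  PySem.List.pySetD g r (PySem.List.pySetD (PySem.List.pyGetD g r []) c v)

-- ===== PORT A =====

def pvDirs : List (Int × Int) := [(-1, 0), (0, 1), (1, 0), (0, -1)]

-- the `for dir in …` body of A's BFS while-loop
def pvDirStep (board : List (List Int)) (crow ccol : Int)
    (st : List (List Int) × List (Int × Int) × PySem.Set (Int × Int) × Int) (d : Int × Int) :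
    List (List Int) × List (Int × Int) × PySem.Set (Int × Int) × Int :=
  let (vis, q, pos, cnt) := st
  let nrow := crow + d.1
  let ncol := ccol + d.2
  if 0 ≤ nrow ∧ nrow < 5 ∧ 0 ≤ ncol ∧ ncol < 5 ∧ pvGet2 vis nrow ncol = 0 ∧
      pvGet2 board crow ccol = pvGet2 board nrow ncol then
    (pvSet2 vis nrow ncol 1, q ++ [(nrow, ncol)], PySem.Set.add pos (nrow, ncol), cnt + 1)
  else st

def pvBfsDirs (board : List (List Int)) (crow ccol : Int)
    (st : List (List Int) × List (Int × Int) × PySem.Set (Int × Int) × Int) :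
    List (List Int) × List (Int × Int) × PySem.Set (Int × Int) × Int :=
  pvDirs.foldl (pvDirStep board crow ccol) st

-- A's `while q:` loop (fuel 1000 is ample: ≤ 26 iterations happen; proved via the invariant)
def pvBfsLoop (board : List (List Int)) : Nat → List (List Int) → List (Int × Int) →
    PySem.Set (Int × Int) → Int → List (List Int) × PySem.Set (Int × Int) × Int
  | 0, vis, _, pos, cnt => (vis, pos, cnt)
  | fuel + 1, vis, q, pos, cnt =>
    match q with
    | [] => (vis, pos, cnt)
    | c :: rest =>
      let st := pvBfsDirs board c.1 c.2 (vis, rest, pos, cnt)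
      pvBfsLoop board fuel st.1 st.2.1 st.2.2.1 st.2.2.2

-- A's BFS; returns (board, visited, cnt-or-0).  The clearing loop iterates a Python set,
-- which is order-insensitive here (every write stores the constant 0).
def pvBFS (board vis : List (List Int)) (i j : Int) (is_clear : Bool) :
    List (List Int) × List (List Int) × Int :=
  let q : List (Int × Int) := [] ++ [(i, j)]
  let pos : PySem.Set (Int × Int) := PySem.Set.add PySem.Set.empty (i, j)
  let vis := pvSet2 vis i j 1
  let cnt : Int := 0 + 1
  let r := pvBfsLoop board 1000 vis q pos cnt
  if r.2.2 ≥ 3 then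
    (if is_clear then r.2.1.foldl (fun b (p : Int × Int) => pvSet2 b p.1 p.2 0) board else board,
     r.1, r.2.2)
  else (board, r.1, 0)

def count_clear (board : List (List Int)) (is_clear : Bool) : Int :=
  let visited : List (List Int) := List.replicate 5 (List.replicate 5 (0 : Int))
  let st := (PySem.List.pyRange 0 5 1).foldl (fun st i =>
    (PySem.List.pyRange 0 5 1).foldl (fun (st : List (List Int) × List (List Int) × Int) j =>
      if pvGet2 st.2.1 i j = 0 then
        let r := pvBFS st.1 st.2.1 i j is_clear
        (r.1, r.2.1, st.2.2 + r.2.2)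
      else st) st) (board, visited, (0 : Int))
  st.2.2

-- ===== PORT B =====

def pvNbrs (r c : Int) : List (Int × Int) := [(r - 1, c), (r, c + 1), (r + 1, c), (r, c - 1)]

-- B's inner `for nr, nc in …` min computation for one cell
def pvPropCell (board : List (List Int)) (label : List Int) (r c : Int) : Int :=
  (pvNbrs r c).foldl (fun m p =>
    if 0 ≤ p.1 ∧ p.1 < 5 ∧ 0 ≤ p.2 ∧ p.2 < 5 ∧ pvGet2 board r c = pvGet2 board p.1 p.2 then
      min m (PySem.List.pyGetD label (5 * p.1 + p.2) 0)
    else m) (PySem.List.pyGetD label (5 * r + c) 0)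

-- one synchronous pass: new = [min-label of each cell]
def pvPropagate (board : List (List Int)) (label : List Int) : List Int :=
  (PySem.List.pyRange 0 5 1).foldl (fun acc r =>
    (PySem.List.pyRange 0 5 1).foldl (fun acc c => acc ++ [pvPropCell board label r c]) acc) []

def pvLabels (board : List (List Int)) : List Int :=
  (PySem.List.pyRange 0 25 1).foldl (fun label _ => pvPropagate board label)
    (PySem.List.pyRange 0 25 1)

def count_clear_alt (board : List (List Int)) (is_clear : Bool) : Int :=
  let label := pvLabels board
  let size := label.foldl (fun (d : PySem.Dict Int Int) l => d.insert l (d.getD l 0 + 1))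
    PySem.Dict.empty
  let st := (PySem.List.pyRange 0 5 1).foldl (fun st r =>
    (PySem.List.pyRange 0 5 1).foldl (fun (st : List (List Int) × Int) c =>
      if size.getD (PySem.List.pyGetD label (5 * r + c) 0) 0 ≥ 3 then
        ((if is_clear then pvSet2 st.1 r c 0 else st.1), st.2 + 1)
      else st) st) (board, (0 : Int))
  st.2

-- ===== PRECONDITION & SPEC =====
-- Pre_: exactly the boards with at least 5 rows whose first 5 rows have at least 5 columns;
-- on anything smaller both programs raise IndexError reading board[r][c] for r,c in 0..4.
def Pre_count_clear (board : List (List Int)) (is_clear : Bool) : Prop :=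
  5 ≤ board.length ∧ ∀ row ∈ board.take 5, 5 ≤ row.length
instance (board : List (List Int)) (is_clear : Bool) : Decidable (Pre_count_clear board is_clear) := by
  unfold Pre_count_clear; infer_instance

def pvWitness_count_clear : List (List Int) × Bool :=
  ([[1, 1, 1, 0, 0], [0, 2, 0, 0, 0], [0, 2, 0, 3, 3], [0, 2, 0, 0, 3], [0, 0, 0, 0, 3]], true)

def Spec_count_clear (board : List (List Int)) (is_clear : Bool) (out : Int) : Prop := out = count_clear_alt board is_clear
instance (board : List (List Int)) (is_clear : Bool) (out : Int) : Decidable (Spec_count_clear board is_clear out) := by unfold Spec_count_clear; infer_instance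

-- ===== CLAIM (what is proved, stated in full; the proofs are below) =====
def Claim_equal_count_clear : Prop := ∀ (board : List (List Int)) (is_clear : Bool), Dom_count_clear board is_clear → Pre_count_clear board is_clear → Spec_count_clear board is_clear (count_clear board is_clear)

-- ===== LEMMAS AND PROOFS =====


-- ---------- the common specification: saturation closure of the equal-value adjacency ----------

-- the 25 cells in row-major order
def gridList : List (Int × Int) := [(0, 0), (0, 1), (0, 2), (0, 3), (0, 4), (1, 0), (1, 1), (1, 2), (1, 3), (1, 4), (2, 0), (2, 1), (2, 2), (2, 3), (2, 4), (3, 0), (3, 1), (3, 2), (3, 3), (3, 4), (4, 0), (4, 1), (4, 2), (4, 3), (4, 4)]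

def gridF : Finset (Int × Int) :=
  (Finset.range 5 ×ˢ Finset.range 5).image (fun rc => ((rc.1 : Int), (rc.2 : Int)))

theorem mem_gridF {p : Int × Int} : p ∈ gridF ↔ 0 ≤ p.1 ∧ p.1 < 5 ∧ 0 ≤ p.2 ∧ p.2 < 5 := by
  obtain ⟨a, b⟩ := p
  simp only [gridF, Finset.mem_image, Finset.mem_product, Finset.mem_range, Prod.mk.injEq]
  constructor
  · rintro ⟨⟨r, c⟩, ⟨h1, h2⟩, h3, h4⟩
    omega
  · rintro ⟨h1, h2, h3, h4⟩
    exact ⟨(a.toNat, b.toNat), ⟨by omega, by omega⟩, by omega, by omega⟩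

theorem gridList_toFinset : gridList.toFinset = gridF := by decide

theorem gridList_nodup : gridList.Nodup := by decide

theorem card_gridF : gridF.card = 25 := by decide

abbrev Adj (board : List (List Int)) (p q : Int × Int) : Prop :=
  p ∈ gridF ∧ q ∈ gridF ∧ q ∈ pvNbrs p.1 p.2 ∧ pvGet2 board p.1 p.2 = pvGet2 board q.1 q.2

def Sat (board : List (List Int)) (S : Finset (Int × Int)) : Finset (Int × Int) :=
  S ∪ gridF.filter (fun nq => ∃ p ∈ S, Adj board p nq)

def compC (board : List (List Int)) (p : Int × Int) : Finset (Int × Int) :=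
  (Sat board)^[25] {p}

theorem Adj_symm {board : List (List Int)} {p q : Int × Int} (h : Adj board p q) :
    Adj board q p := by
  obtain ⟨hp, hq, hn, hv⟩ := h
  refine ⟨hq, hp, ?_, hv.symm⟩
  obtain ⟨a, b⟩ := p; obtain ⟨c, d⟩ := q
  simp only [pvNbrs, List.mem_cons, List.not_mem_nil, or_false, Prod.mk.injEq] at hn ⊢
  obtain ⟨h1, h2⟩ | ⟨h1, h2⟩ | ⟨h1, h2⟩ | ⟨h1, h2⟩ := hn <;> omega

theorem subset_Sat {board : List (List Int)} {S : Finset (Int × Int)} : S ⊆ Sat board S :=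
  Finset.subset_union_left

theorem mem_Sat {board : List (List Int)} {S : Finset (Int × Int)} {x : Int × Int} :
    x ∈ Sat board S ↔ x ∈ S ∨ (x ∈ gridF ∧ ∃ p ∈ S, Adj board p x) := by
  simp [Sat, Finset.mem_union, Finset.mem_filter]

theorem Sat_mono {board : List (List Int)} {S T : Finset (Int × Int)} (h : S ⊆ T) :
    Sat board S ⊆ Sat board T := by
  intro x hx
  rw [mem_Sat] at hx ⊢
  rcases hx with hx | ⟨hg, p, hp, ha⟩
  · exact Or.inl (h hx)
  · exact Or.inr ⟨hg, p, h hp, ha⟩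

theorem Sat_union {board : List (List Int)} (A B : Finset (Int × Int)) :
    Sat board (A ∪ B) = Sat board A ∪ Sat board B := by
  ext x
  simp only [mem_Sat, Finset.mem_union, mem_Sat]
  constructor
  · rintro (⟨h | h⟩ | ⟨hg, p, hp | hp, ha⟩)
    · exact Or.inl (Or.inl h)
    · exact Or.inr (Or.inl h)
    · exact Or.inl (Or.inr ⟨hg, p, hp, ha⟩)
    · exact Or.inr (Or.inr ⟨hg, p, hp, ha⟩)
  · rintro ((h | ⟨hg, p, hp, ha⟩) | (h | ⟨hg, p, hp, ha⟩))
    · exact Or.inl (Or.inl h)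
    · exact Or.inr ⟨hg, p, Or.inl hp, ha⟩
    · exact Or.inl (Or.inr h)
    · exact Or.inr ⟨hg, p, Or.inr hp, ha⟩

theorem Sat_subset_grid {board : List (List Int)} {S : Finset (Int × Int)} (h : S ⊆ gridF) :
    Sat board S ⊆ gridF := by
  intro x hx
  rw [mem_Sat] at hx
  rcases hx with hx | ⟨hg, _⟩
  · exact h hx
  · exact hg

theorem iter_subset_grid {board : List (List Int)} {S : Finset (Int × Int)} (h : S ⊆ gridF)
    (t : Nat) : (Sat board)^[t] S ⊆ gridF := by
  induction t generalizing S with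
  | zero => exact h
  | succ t ih => rw [Function.iterate_succ_apply]; exact ih (Sat_subset_grid h)

theorem subset_iter {board : List (List Int)} {S : Finset (Int × Int)} (t : Nat) :
    S ⊆ (Sat board)^[t] S := by
  induction t generalizing S with
  | zero => exact subset_rfl
  | succ t ih => rw [Function.iterate_succ_apply]; exact subset_Sat.trans ih

theorem iter_stable_of_eq {board : List (List Int)} {S : Finset (Int × Int)} {t : Nat}
    (h : (Sat board)^[t + 1] S = (Sat board)^[t] S) :
    ∀ u, t ≤ u → (Sat board)^[u] S = (Sat board)^[t] S := by
  intro u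
  induction u with
  | zero => intro hu; have ht : t = 0 := by omega
            subst ht; rfl
  | succ u ih =>
    intro hu
    rcases Nat.lt_or_ge t (u + 1) with hlt | hge
    · have ht : t ≤ u := by omega
      calc (Sat board)^[u + 1] S = Sat board ((Sat board)^[u] S) :=
            Function.iterate_succ_apply' _ _ _
        _ = Sat board ((Sat board)^[t] S) := by rw [ih ht]
        _ = (Sat board)^[t + 1] S := (Function.iterate_succ_apply' _ _ _).symm
        _ = (Sat board)^[t] S := h
    · have ht : t = u + 1 := by omega
      rw [ht]

theorem card_iter_grow {board : List (List Int)} {S : Finset (Int × Int)}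
    (h : ∀ t < 25, (Sat board)^[t] S ≠ (Sat board)^[t + 1] S) :
    ∀ t ≤ 25, S.card + t ≤ ((Sat board)^[t] S).card := by
  intro t ht
  induction t with
  | zero => simp
  | succ t ih =>
    have h1 : S.card + t ≤ ((Sat board)^[t] S).card := ih (by omega)
    have hss : (Sat board)^[t] S ⊂ (Sat board)^[t + 1] S := by
      refine ⟨?_, ?_⟩
      · rw [Function.iterate_succ_apply']; exact subset_Sat
      · intro hc
        exact h t (by omega) (Finset.Subset.antisymm (by rw [Function.iterate_succ_apply']; exact subset_Sat) hc)
    have := Finset.card_lt_card hss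
    omega

theorem Sat_comp_eq {board : List (List Int)} {p : Int × Int} (hp : p ∈ gridF) :
    Sat board (compC board p) = compC board p := by
  by_cases hstab : ∃ t < 25, (Sat board)^[t] ({p} : Finset (Int × Int)) = (Sat board)^[t + 1] ({p} : Finset (Int × Int))
  · obtain ⟨t, ht, heq⟩ := hstab
    have h25 : compC board p = (Sat board)^[t] ({p} : Finset (Int × Int)) :=
      iter_stable_of_eq heq.symm 25 (by omega)
    rw [h25]
    exact (Function.iterate_succ_apply' _ t _).symm.trans heq.symm
  · push_neg at hstab
    exfalso
    have hgrow := card_iter_grow (S := ({p} : Finset (Int × Int))) (board := board)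
      (fun t ht => hstab t ht) 25 le_rfl
    have hsub : (Sat board)^[25] ({p} : Finset (Int × Int)) ⊆ gridF :=
      iter_subset_grid (by simpa [Finset.singleton_subset_iff] using hp) 25
    have := Finset.card_le_card hsub
    rw [card_gridF] at this
    rw [Finset.card_singleton] at hgrow
    omega

theorem comp_minimal {board : List (List Int)} {p : Int × Int} {C : Finset (Int × Int)}
    (hp : p ∈ C) (hC : Sat board C ⊆ C) : compC board p ⊆ C := by
  rw [compC]
  have : ∀ t, (Sat board)^[t] ({p} : Finset (Int × Int)) ⊆ C := by
    intro t
    induction t with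
    | zero => simpa [Finset.singleton_subset_iff]
    | succ t ih =>
      rw [Function.iterate_succ_apply']
      exact (Sat_mono ih).trans hC
  exact this 25

theorem mem_comp_self {board : List (List Int)} (p : Int × Int) : p ∈ compC board p := by
  have := subset_iter (board := board) (S := ({p} : Finset (Int × Int))) 25
  exact this (Finset.mem_singleton_self p)

theorem comp_subset_grid {board : List (List Int)} {p : Int × Int} (hp : p ∈ gridF) :
    compC board p ⊆ gridF :=
  iter_subset_grid (by simpa [Finset.singleton_subset_iff] using hp) 25

theorem adj_mem_comp {board : List (List Int)} {p q r : Int × Int} (hp : p ∈ gridF)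
    (hq : q ∈ compC board p) (ha : Adj board q r) : r ∈ compC board p := by
  have hclosed := Sat_comp_eq (board := board) hp
  rw [← hclosed, mem_Sat]
  exact Or.inr ⟨ha.2.1, q, hq, ha⟩

theorem comp_symm {board : List (List Int)} {p q : Int × Int} (hp : p ∈ gridF)
    (hq : q ∈ compC board p) : p ∈ compC board q := by
  rw [compC] at hq
  have main : ∀ t, ∀ p q : Int × Int, p ∈ gridF → q ∈ (Sat board)^[t] ({p} : Finset (Int × Int)) →
      p ∈ compC board q := by
    intro t
    induction t with
    | zero =>
      intro p q _ hq
      simp only [Function.iterate_zero_apply, Finset.mem_singleton] at hq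
      subst hq; exact mem_comp_self q
    | succ t ih =>
      intro p q hp hq
      rw [Function.iterate_succ_apply', mem_Sat] at hq
      rcases hq with hq | ⟨hg, r, hr, ha⟩
      · exact ih p q hp hq
      · have hpr : p ∈ compC board r := ih p r hp hr
        have hqg : q ∈ gridF := hg
        have hrq : r ∈ compC board q := by
          have : Adj board q r := Adj_symm ha
          exact adj_mem_comp hqg (mem_comp_self q) this
        have : compC board r ⊆ compC board q :=
          comp_minimal hrq (le_of_eq (Sat_comp_eq hqg))
        exact this hpr
  exact main 25 p q hp hq

theorem comp_eq_of_mem {board : List (List Int)} {p q : Int × Int} (hp : p ∈ gridF)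
    (hq : q ∈ compC board p) : compC board q = compC board p := by
  have hqg : q ∈ gridF := comp_subset_grid hp hq
  apply Finset.Subset.antisymm
  · exact comp_minimal hq (le_of_eq (Sat_comp_eq hp))
  · exact comp_minimal (comp_symm hp hq) (le_of_eq (Sat_comp_eq hqg))

def indC (board : List (List Int)) (q : Int × Int) : Int :=
  if 3 ≤ (compC board q).card then 1 else 0

def countSpec (board : List (List Int)) : Int := ∑ p ∈ gridF, indC board p


-- ---------- concrete 5×5 grid bookkeeping ----------

-- boards/visited matrices with at least 5 rows of at least 5 columns
def WfB (g : List (List Int)) : Prop :=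
  5 ≤ g.length ∧ ∀ k : Nat, k < 5 → 5 ≤ (g.getD k []).length

theorem pvGet2_eq_getD {g : List (List Int)} {r c : Int}
    (hr0 : 0 ≤ r) (hr5 : r < 5) (hc0 : 0 ≤ c) (hlen : 5 ≤ g.length) :
    pvGet2 g r c = (g.getD r.toNat []).getD c.toNat 0 := by
  have hrl : r < (g.length : Int) := by omega
  rw [pvGet2, PySem.List.pyGetD_eq_getElem g [] hr0 hrl,
    List.getD_eq_getElem g [] (by omega)]
  generalize g[r.toNat] = row
  rcases Nat.lt_or_ge c.toNat row.length with hc | hc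
  · rw [PySem.List.pyGetD_eq_getElem row 0 hc0 (by omega), List.getD_eq_getElem _ _ hc]
  · rw [PySem.List.pyGetD_of_none row c 0 (by
      rw [PySem.List.pyGet?_eq_none_iff]
      simp only [PySem.Raise.InRange, not_and, not_lt]
      omega), List.getD_eq_default _ _ (by omega)]

theorem pvSet2_eq_set {g : List (List Int)} {r c : Int}
    (hr0 : 0 ≤ r) (hr5 : r < 5) (hc0 : 0 ≤ c) (hlen : 5 ≤ g.length) (v : Int) :
    pvSet2 g r c v = g.set r.toNat ((g.getD r.toNat []).set c.toNat v) := by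
  have hrl : r < (g.length : Int) := by omega
  rw [pvSet2, PySem.List.pySetD_of_nonneg _ _ hr0, PySem.List.pySetD_of_nonneg _ _ hc0,
    PySem.List.pyGetD_eq_getElem _ _ hr0 hrl, List.getD_eq_getElem _ _ (by omega)]

theorem WfB_pvSet2 {g : List (List Int)} (hwf : WfB g) {r c : Int}
    (hr0 : 0 ≤ r) (hr5 : r < 5) (hc0 : 0 ≤ c) (v : Int) :
    WfB (pvSet2 g r c v) := by
  obtain ⟨hlen, hrow⟩ := hwf
  rw [pvSet2_eq_set hr0 hr5 hc0 hlen]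
  refine ⟨by simpa using hlen, fun k hk => ?_⟩
  have hkg : k < g.length := by omega
  rw [List.getD_eq_getElem _ _ (by simpa using hkg), List.getElem_set]
  split_ifs with h
  · rw [List.length_set, h]
    exact hrow k hk
  · have h5 := hrow k hk
    rwa [List.getD_eq_getElem _ _ hkg] at h5

theorem pvGet2_pvSet2 {g : List (List Int)} (hwf : WfB g) {r c r' c' : Int}
    (hr0 : 0 ≤ r) (hr5 : r < 5) (hc0 : 0 ≤ c) (hc5 : c < 5)
    (hr0' : 0 ≤ r') (hr5' : r' < 5) (hc0' : 0 ≤ c') (hc5' : c' < 5) (v : Int) :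
    pvGet2 (pvSet2 g r c v) r' c' = if r' = r ∧ c' = c then v else pvGet2 g r' c' := by
  obtain ⟨hlen, hrow⟩ := hwf
  have hrn : r.toNat < g.length := by omega
  have hrn' : r'.toNat < g.length := by omega
  rw [pvSet2_eq_set hr0 hr5 hc0 hlen v,
    pvGet2_eq_getD hr0' hr5' hc0' (by simpa using hlen),
    pvGet2_eq_getD hr0' hr5' hc0' hlen,
    List.getD_eq_getElem (g.set r.toNat ((g.getD r.toNat []).set c.toNat v)) []
      (by simpa using hrn'),
    List.getElem_set]
  by_cases hrr : r.toNat = r'.toNat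
  · have hre : r = r' := by omega
    subst hre
    rw [if_pos rfl]
    have hrowlen : 5 ≤ (g.getD r.toNat []).length := hrow r.toNat (by omega)
    rw [List.getD_eq_getElem ((g.getD r.toNat []).set c.toNat v) 0
      (by rw [List.length_set]; omega), List.getElem_set]
    by_cases hcc : c.toNat = c'.toNat
    · have hce : c' = c := by omega
      rw [if_pos hcc, if_pos ⟨rfl, hce⟩]
    · rw [if_neg hcc, if_neg (fun hand => hcc (by omega)),
        List.getD_eq_getElem (g.getD r.toNat []) 0 (by omega)]
  · have hre : ¬ (r' = r ∧ c' = c) := fun hand => hrr (by rw [hand.1])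
    rw [if_neg hrr, if_neg hre, List.getD_eq_getElem g [] hrn']

-- the set of visited grid cells
def visF (vis : List (List Int)) : Finset (Int × Int) :=
  gridF.filter (fun p => pvGet2 vis p.1 p.2 ≠ 0)

theorem mem_visF {vis : List (List Int)} {p : Int × Int} :
    p ∈ visF vis ↔ p ∈ gridF ∧ pvGet2 vis p.1 p.2 ≠ 0 := by
  simp [visF, Finset.mem_filter]

theorem visF_pvSet2_one {vis : List (List Int)} (hwf : WfB vis) {p : Int × Int}
    (hp : p ∈ gridF) : visF (pvSet2 vis p.1 p.2 1) = insert p (visF vis) := by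
  have hpb := mem_gridF.mp hp
  ext x
  rw [Finset.mem_insert, mem_visF, mem_visF]
  rcases Decidable.em (x ∈ gridF) with hx | hx
  · have hxb := mem_gridF.mp hx
    rw [pvGet2_pvSet2 hwf hpb.1 hpb.2.1 hpb.2.2.1 hpb.2.2.2 hxb.1 hxb.2.1 hxb.2.2.1 hxb.2.2.2]
    have hxp : (x.1 = p.1 ∧ x.2 = p.2) ↔ x = p := by
      obtain ⟨a, b⟩ := x; obtain ⟨a', b'⟩ := p; simp [Prod.ext_iff]
    split_ifs with h
    · constructor
      · intro _; exact Or.inl (hxp.mp h)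
      · intro _; exact ⟨hx, by norm_num⟩
    · constructor
      · rintro ⟨_, hne⟩; exact Or.inr ⟨hx, hne⟩
      · rintro (rfl | ⟨_, hne⟩)
        · exact absurd ⟨rfl, rfl⟩ h
        · exact ⟨hx, hne⟩
  · constructor
    · rintro ⟨hxg, _⟩; exact absurd hxg hx
    · rintro (rfl | ⟨hxg, _⟩)
      · exact absurd hp hx
      · exact absurd hxg hx

theorem visF_subset_grid (vis : List (List Int)) : visF vis ⊆ gridF :=
  Finset.filter_subset _ _

theorem card_visF_le (vis : List (List Int)) : (visF vis).card ≤ 25 := by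
  have := Finset.card_le_card (visF_subset_grid vis)
  rwa [card_gridF] at this


theorem nbr_of_dir {crow ccol : Int} {d : Int × Int} (hd : d ∈ pvDirs) :
    (crow + d.1, ccol + d.2) ∈ pvNbrs crow ccol := by
  simp only [pvDirs, List.mem_cons, List.not_mem_nil, or_false] at hd
  rcases hd with rfl | rfl | rfl | rfl <;>
    simp [pvNbrs, Prod.ext_iff] <;> omega

theorem dir_of_nbr {crow ccol : Int} {x : Int × Int} (hx : x ∈ pvNbrs crow ccol) :
    ∃ d ∈ pvDirs, x = (crow + d.1, ccol + d.2) := by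
  simp only [pvNbrs, List.mem_cons, List.not_mem_nil, or_false] at hx
  rcases hx with rfl | rfl | rfl | rfl
  · exact ⟨(-1, 0), by simp [pvDirs], by simp [Prod.ext_iff]; omega⟩
  · exact ⟨(0, 1), by simp [pvDirs], by simp [Prod.ext_iff]⟩
  · exact ⟨(1, 0), by simp [pvDirs], by simp [Prod.ext_iff]⟩
  · exact ⟨(0, -1), by simp [pvDirs], by simp [Prod.ext_iff]; omega⟩

theorem set_add_of_not_mem {pos : PySem.Set (Int × Int)} {x : Int × Int} (h : x ∉ pos) :
    PySem.Set.add pos x = pos ++ [x] := by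
  simp [PySem.Set.add, PySem.Set.contains]
  intro hc
  exact absurd hc h

theorem dirs_fold {board₀ board' : List (List Int)} {V : Finset (Int × Int)}
    (ds : List (Int × Int)) (hds : ∀ d ∈ ds, d ∈ pvDirs)
    {crow ccol : Int} (hc : (crow, ccol) ∈ gridF) (hcV : (crow, ccol) ∉ V)
    (H2 : ∀ p ∈ gridF, p ∉ V → pvGet2 board' p.1 p.2 = pvGet2 board₀ p.1 p.2)
    (H7 : V ⊆ gridF) :
    ∀ (vis : List (List Int)) (q pos : List (Int × Int)) (cnt : Int),
    WfB vis →
    visF vis = V ∪ pos.toFinset →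
    (∀ x ∈ pos, x ∈ gridF) →
    ∃ (new : List (Int × Int)) (vis' : List (List Int)),
      ds.foldl (pvDirStep board' crow ccol) (vis, q, pos, cnt) =
        (vis', q ++ new, pos ++ new, cnt + (new.length : Int)) ∧
      WfB vis' ∧
      visF vis' = visF vis ∪ new.toFinset ∧
      new.Nodup ∧
      (∀ x ∈ new, x ∉ pos ∧ x ∉ visF vis ∧ Adj board₀ (crow, ccol) x) ∧
      (∀ d ∈ ds, ∀ x : Int × Int, x = (crow + d.1, ccol + d.2) →
        Adj board₀ (crow, ccol) x → x ∈ visF vis') := by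
  induction ds with
  | nil =>
    intro vis q pos cnt H1 H3 H6
    exact ⟨[], vis, by simp, H1, by simp, List.nodup_nil, by simp, by simp⟩
  | cons d rest ih =>
    intro vis q pos cnt H1 H3 H6
    have hd : d ∈ pvDirs := hds d List.mem_cons_self
    have hrest : ∀ d' ∈ rest, d' ∈ pvDirs := fun d' h => hds d' (List.mem_cons_of_mem d h)
    set n : Int × Int := (crow + d.1, ccol + d.2) with hn
    have hVsub : V ⊆ visF vis := H3 ▸ Finset.subset_union_left
    have hpossub : pos.toFinset ⊆ visF vis := H3 ▸ Finset.subset_union_right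
    have hcb := mem_gridF.mp hc
    have hGequiv : (0 ≤ n.1 ∧ n.1 < 5 ∧ 0 ≤ n.2 ∧ n.2 < 5 ∧ pvGet2 vis n.1 n.2 = 0 ∧
        pvGet2 board' crow ccol = pvGet2 board' n.1 n.2) ↔
        (Adj board₀ (crow, ccol) n ∧ n ∉ visF vis) := by
      constructor
      · rintro ⟨h1, h2, h3, h4, h5, h6⟩
        have hng : n ∈ gridF := mem_gridF.mpr ⟨h1, h2, h3, h4⟩
        have hnvis : n ∉ visF vis := by
          rw [mem_visF]
          rintro ⟨_, hne⟩
          exact hne h5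
        have hnV : n ∉ V := fun hmem => hnvis (hVsub hmem)
        refine ⟨⟨hc, hng, nbr_of_dir hd, ?_⟩, hnvis⟩
        rw [← H2 (crow, ccol) hc hcV, ← H2 n hng hnV]
        exact h6
      · rintro ⟨⟨_, hng, _, hval⟩, hnvis⟩
        have hnb := mem_gridF.mp hng
        have hnV : n ∉ V := fun hmem => hnvis (hVsub hmem)
        refine ⟨hnb.1, hnb.2.1, hnb.2.2.1, hnb.2.2.2, ?_, ?_⟩
        · by_contra hne
          exact hnvis (mem_visF.mpr ⟨hng, hne⟩)
        · rw [H2 (crow, ccol) hc hcV, H2 n hng hnV]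
          exact hval
    have hstep : (pvDirStep board' crow ccol (vis, q, pos, cnt) d) =
        if 0 ≤ n.1 ∧ n.1 < 5 ∧ 0 ≤ n.2 ∧ n.2 < 5 ∧ pvGet2 vis n.1 n.2 = 0 ∧
            pvGet2 board' crow ccol = pvGet2 board' n.1 n.2 then
          (pvSet2 vis n.1 n.2 1, q ++ [n], PySem.Set.add pos n, cnt + 1)
        else (vis, q, pos, cnt) := rfl
    by_cases hG : Adj board₀ (crow, ccol) n ∧ n ∉ visF vis
    · have hGt := hGequiv.mpr hG
      have hng : n ∈ gridF := hG.1.2.1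
      have hnb := mem_gridF.mp hng
      have hnpos : n ∉ pos := fun hmem =>
        hG.2 (hpossub (List.mem_toFinset.mpr hmem))
      have hadd : PySem.Set.add pos n = pos ++ [n] := set_add_of_not_mem hnpos
      have H1' : WfB (pvSet2 vis n.1 n.2 1) := WfB_pvSet2 H1 hnb.1 hnb.2.1 hnb.2.2.1 1
      have hvisF1 : visF (pvSet2 vis n.1 n.2 1) = insert n (visF vis) := by
        have := visF_pvSet2_one H1 hng
        simpa using this
      have H3' : visF (pvSet2 vis n.1 n.2 1) = V ∪ (pos ++ [n]).toFinset := by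
        rw [hvisF1, H3]
        ext y
        simp [Finset.mem_insert, Finset.mem_union, List.mem_toFinset]
      have H6' : ∀ x ∈ pos ++ [n], x ∈ gridF := by
        intro x hx
        rcases List.mem_append.mp hx with hx | hx
        · exact H6 x hx
        · rw [List.mem_singleton.mp hx]; exact hng
      obtain ⟨new', vis', heq, hwf', hvisF', hnd', hprops', hcompl'⟩ :=
        ih hrest (pvSet2 vis n.1 n.2 1) (q ++ [n]) (pos ++ [n]) (cnt + 1) H1' H3' H6'
      have hmono : visF (pvSet2 vis n.1 n.2 1) ⊆ visF vis' := hvisF' ▸ Finset.subset_union_left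
      refine ⟨n :: new', vis', ?_, hwf', ?_, ?_, ?_, ?_⟩
      · rw [List.foldl_cons, hstep, if_pos hGt, hadd, heq]
        refine Prod.ext rfl (Prod.ext ?_ (Prod.ext ?_ ?_)) <;> simp
        omega
      · rw [hvisF', hvisF1]
        ext y
        simp [Finset.mem_insert, Finset.mem_union, List.mem_toFinset]
      · refine List.Nodup.cons (fun hmem => ?_) hnd'
        exact ((hprops' n hmem).1) (List.mem_append.mpr (Or.inr (List.mem_singleton.mpr rfl)))
      · intro x hx
        rcases List.mem_cons.mp hx with rfl | hx
        · exact ⟨hnpos, hG.2, hG.1⟩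
        · obtain ⟨hxp, hxv, hxa⟩ := hprops' x hx
          refine ⟨fun hmem => hxp (List.mem_append.mpr (Or.inl hmem)), fun hmem => ?_, hxa⟩
          exact hxv (by rw [hvisF1]; exact Finset.mem_insert_of_mem hmem)
      · intro d' hd' x hx hadj
        rcases List.mem_cons.mp hd' with rfl | hd'
        · subst hx
          exact hmono (by rw [hvisF1]; exact Finset.mem_insert_self _ _)
        · exact hcompl' d' hd' x hx hadj
    · have hGf := fun h => hG (hGequiv.mp h)
      obtain ⟨new', vis', heq, hwf', hvisF', hnd', hprops', hcompl'⟩ :=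
        ih hrest vis q pos cnt H1 H3 H6
      have hmono : visF vis ⊆ visF vis' := hvisF' ▸ Finset.subset_union_left
      refine ⟨new', vis', ?_, hwf', hvisF', hnd', hprops', ?_⟩
      · rw [List.foldl_cons, hstep, if_neg hGf, heq]
      · intro d' hd' x hx hadj
        rcases List.mem_cons.mp hd' with rfl | hd'
        · subst hx
          have hnv : n ∈ visF vis := by
            by_contra hnv
            exact hG ⟨hadj, hnv⟩
          exact hmono hnv
        · exact hcompl' d' hd' x hx hadj


theorem comp_disj_V {board₀ : List (List Int)} {V : Finset (Int × Int)} {s : Int × Int}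
    (hVc : ∀ p ∈ V, ∀ r, Adj board₀ p r → r ∈ V) (hs : s ∈ gridF) (hsV : s ∉ V) :
    ∀ x ∈ compC board₀ s, x ∉ V := by
  intro x hx hxV
  have hsx : s ∈ compC board₀ x := comp_symm hs hx
  have hVclosed : Sat board₀ V ⊆ V := by
    intro y hy
    rw [mem_Sat] at hy
    rcases hy with hy | ⟨_, p, hp, ha⟩
    · exact hy
    · exact hVc p hp y ha
  exact hsV ((comp_minimal hxV hVclosed) hsx)

theorem bfs_terminal {board₀ : List (List Int)} {s : Int × Int}
    (hs : s ∈ gridF) {pos : List (Int × Int)}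
    (Hpos_sub : ∀ x ∈ pos, x ∈ compC board₀ s) (Hspos : s ∈ pos)
    (Hclosed : ∀ p ∈ pos, ∀ r, Adj board₀ p r → r ∈ pos) :
    pos.toFinset = compC board₀ s := by
  apply Finset.Subset.antisymm
  · intro x hx
    exact Hpos_sub x (List.mem_toFinset.mp hx)
  · apply comp_minimal (List.mem_toFinset.mpr Hspos)
    intro y hy
    rw [mem_Sat] at hy
    rcases hy with hy | ⟨_, p, hp, ha⟩
    · exact hy
    · exact List.mem_toFinset.mpr (Hclosed p (List.mem_toFinset.mp hp) y ha)

theorem bfsLoop_spec {board₀ board' : List (List Int)} {V : Finset (Int × Int)} {s : Int × Int}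
    (H2 : ∀ p ∈ gridF, p ∉ V → pvGet2 board' p.1 p.2 = pvGet2 board₀ p.1 p.2)
    (H7 : V ⊆ gridF)
    (HVc : ∀ p ∈ V, ∀ r, Adj board₀ p r → r ∈ V)
    (hs : s ∈ gridF) (HsV : s ∉ V) :
    ∀ (fuel : Nat) (vis : List (List Int)) (q pos : List (Int × Int)) (cnt : Int),
    WfB vis →
    visF vis = V ∪ pos.toFinset →
    (∀ x ∈ pos, x ∈ compC board₀ s) →
    s ∈ pos →
    (∀ x ∈ q, x ∈ pos) →
    q.Nodup →
    pos.Nodup →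
    (∀ p ∈ pos, p ∉ q → ∀ r, Adj board₀ p r → r ∈ pos) →
    cnt = (pos.length : Int) →
    26 * (25 - (visF vis).card) + q.length ≤ fuel →
    (pvBfsLoop board' fuel vis q pos cnt).2.1.toFinset = compC board₀ s ∧
    (pvBfsLoop board' fuel vis q pos cnt).2.2 = ((compC board₀ s).card : Int) ∧
    visF (pvBfsLoop board' fuel vis q pos cnt).1 = V ∪ compC board₀ s ∧
    WfB (pvBfsLoop board' fuel vis q pos cnt).1 := by
  intro fuel
  induction fuel with
  | zero =>
    intro vis q pos cnt H1 H3 Hpos_sub Hspos Hq Hqnd Hposnd Hclosed Hcnt Hfuel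
    have hqnil : q = [] := List.length_eq_zero_iff.mp (by omega)
    subst hqnil
    have hterm : pos.toFinset = compC board₀ s :=
      bfs_terminal hs Hpos_sub Hspos
        (fun p hp r ha => Hclosed p hp (List.not_mem_nil) r ha)
    refine ⟨hterm, ?_, ?_, H1⟩
    · rw [show (pvBfsLoop board' 0 vis [] pos cnt).2.2 = cnt from rfl, Hcnt,
        ← hterm, List.toFinset_card_of_nodup Hposnd]
    · rw [show (pvBfsLoop board' 0 vis [] pos cnt).1 = vis from rfl, H3, hterm]
  | succ fuel ih =>
    intro vis q pos cnt H1 H3 Hpos_sub Hspos Hq Hqnd Hposnd Hclosed Hcnt Hfuel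
    match q, Hq, Hqnd, Hclosed, Hfuel with
    | [], _, _, Hclosed, _ =>
      have hterm : pos.toFinset = compC board₀ s :=
        bfs_terminal hs Hpos_sub Hspos
          (fun p hp r ha => Hclosed p hp (List.not_mem_nil) r ha)
      refine ⟨hterm, ?_, ?_, H1⟩
      · rw [show (pvBfsLoop board' (fuel + 1) vis [] pos cnt).2.2 = cnt from rfl, Hcnt,
          ← hterm, List.toFinset_card_of_nodup Hposnd]
      · rw [show (pvBfsLoop board' (fuel + 1) vis [] pos cnt).1 = vis from rfl, H3, hterm]
    | c :: rest, Hq, Hqnd, Hclosed, Hfuel =>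
      have hcpos : c ∈ pos := Hq c List.mem_cons_self
      have hccomp : c ∈ compC board₀ s := Hpos_sub c hcpos
      have hcg : c ∈ gridF := comp_subset_grid hs hccomp
      have hcV : c ∉ V := comp_disj_V HVc hs HsV c hccomp
      have H6 : ∀ x ∈ pos, x ∈ gridF := fun x hx =>
        comp_subset_grid hs (Hpos_sub x hx)
      have hcpair : ((c.1, c.2) : Int × Int) = c := rfl
      obtain ⟨new, vis', heq, hwf', hvisF', hnewnd, hprops, hcompl⟩ :=
        dirs_fold pvDirs (fun d hd => hd) (hcpair ▸ hcg) (hcpair ▸ hcV) H2 H7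
          vis rest pos cnt H1 H3 H6
      -- the new queue/pos/visited after processing the four directions
      have hnew_comp : ∀ x ∈ new, x ∈ compC board₀ s := by
        intro x hx
        exact adj_mem_comp hs hccomp (hcpair ▸ (hprops x hx).2.2)
      have hnew_not_vis : ∀ x ∈ new, x ∉ visF vis := fun x hx => (hprops x hx).2.1
      have hnew_not_pos : ∀ x ∈ new, x ∉ pos := fun x hx => (hprops x hx).1
      have hrest_sub : ∀ x ∈ rest, x ∈ pos := fun x hx => Hq x (List.mem_cons_of_mem c hx)
      have hrestnd : rest.Nodup := Hqnd.of_cons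
      have hcnrest : c ∉ rest := (List.nodup_cons.mp Hqnd).1
      have hdisj_rest : ∀ x ∈ new, x ∉ rest := fun x hx hmem =>
        hnew_not_pos x hx (hrest_sub x hmem)
      have H3' : visF vis' = V ∪ (pos ++ new).toFinset := by
        rw [hvisF', H3, List.toFinset_append, Finset.union_assoc]
      have hcard' : (visF vis').card = (visF vis).card + new.length := by
        rw [hvisF', Finset.card_union_of_disjoint (by
          rw [Finset.disjoint_right]
          intro a ha
          exact fun hmem => hnew_not_vis a (List.mem_toFinset.mp ha) hmem),
          List.toFinset_card_of_nodup hnewnd]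
      have hred : pvBfsLoop board' (fuel + 1) vis (c :: rest) pos cnt =
          pvBfsLoop board' fuel vis' (rest ++ new) (pos ++ new) (cnt + (new.length : Int)) := by
        simp only [pvBfsLoop, pvBfsDirs]
        rw [heq]
      rw [hred]
      apply ih vis' (rest ++ new) (pos ++ new) (cnt + (new.length : Int)) hwf' H3'
      · intro x hx
        rcases List.mem_append.mp hx with hx | hx
        · exact Hpos_sub x hx
        · exact hnew_comp x hx
      · exact List.mem_append.mpr (Or.inl Hspos)
      · intro x hx
        rcases List.mem_append.mp hx with hx | hx
        · exact List.mem_append.mpr (Or.inl (hrest_sub x hx))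
        · exact List.mem_append.mpr (Or.inr hx)
      · exact List.Nodup.append hrestnd hnewnd (fun a ha hb => hdisj_rest a hb ha)
      · exact List.Nodup.append Hposnd hnewnd (fun a ha hb => hnew_not_pos a hb ha)
      · -- closedness of the processed region
        intro p hp hpq r ha
        rcases List.mem_append.mp hp with hp | hp
        · by_cases hpc : p = c
          · subst hpc
            have hrn : r ∈ pvNbrs p.1 p.2 := ha.2.2.1
            obtain ⟨d, hd, hrd⟩ := dir_of_nbr hrn
            have hrvis : r ∈ visF vis' := hcompl d hd r hrd (hcpair ▸ ha)
            have hrcomp : r ∈ compC board₀ s := adj_mem_comp hs hccomp ha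
            have hrV : r ∉ V := comp_disj_V HVc hs HsV r hrcomp
            rw [H3'] at hrvis
            rcases Finset.mem_union.mp hrvis with h | h
            · exact absurd h hrV
            · exact List.mem_toFinset.mp h
          · have hpnotq : p ∉ c :: rest := by
              intro hmem
              rcases List.mem_cons.mp hmem with h | h
              · exact hpc h
              · exact hpq (List.mem_append.mpr (Or.inl h))
            exact List.mem_append.mpr (Or.inl (Hclosed p hp hpnotq r ha))
        · exact absurd (List.mem_append.mpr (Or.inr hp)) hpq
      · rw [Hcnt]
        push_cast
        rw [List.length_append]
        push_cast
        ring
      · have hb1 : (visF vis').card ≤ 25 := card_visF_le vis'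
        rw [hcard']
        rw [hcard'] at hb1
        simp only [List.length_append, List.length_cons] at Hfuel ⊢
        omega

theorem clear_fold_agree {ps : List (Int × Int)} (hps : ∀ x ∈ ps, x ∈ gridF) :
    ∀ b : List (List Int), WfB b →
    WfB (ps.foldl (fun b (p : Int × Int) => pvSet2 b p.1 p.2 0) b) ∧
    (∀ p ∈ gridF, p ∉ ps →
      pvGet2 (ps.foldl (fun b (p : Int × Int) => pvSet2 b p.1 p.2 0) b) p.1 p.2 =
        pvGet2 b p.1 p.2) := by
  induction ps with
  | nil => exact fun b hb => ⟨hb, fun p _ _ => rfl⟩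
  | cons x rest ih =>
    intro b hb
    have hxg := mem_gridF.mp (hps x List.mem_cons_self)
    have hrest : ∀ y ∈ rest, y ∈ gridF := fun y hy => hps y (List.mem_cons_of_mem x hy)
    have hb1 : WfB (pvSet2 b x.1 x.2 0) := WfB_pvSet2 hb hxg.1 hxg.2.1 hxg.2.2.1 0
    obtain ⟨hwf, hagree⟩ := ih hrest (pvSet2 b x.1 x.2 0) hb1
    refine ⟨hwf, fun p hp hnp => ?_⟩
    have hpb := mem_gridF.mp hp
    rw [List.foldl_cons, hagree p hp (fun hmem => hnp (List.mem_cons_of_mem x hmem)),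
      pvGet2_pvSet2 hb hxg.1 hxg.2.1 hxg.2.2.1 hxg.2.2.2 hpb.1 hpb.2.1 hpb.2.2.1 hpb.2.2.2 0,
      if_neg ?_]
    intro hand
    apply hnp
    have : p = x := by
      obtain ⟨a, b'⟩ := p; obtain ⟨c, d⟩ := x
      simp only at hand
      simp [Prod.ext_iff]
      exact ⟨hand.1, hand.2⟩
    rw [this]
    exact List.mem_cons_self

theorem pvBFS_spec {board₀ board' vis : List (List Int)} {V : Finset (Int × Int)}
    {s : Int × Int} {is_clear : Bool}
    (H2 : ∀ p ∈ gridF, p ∉ V → pvGet2 board' p.1 p.2 = pvGet2 board₀ p.1 p.2)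
    (H7 : V ⊆ gridF)
    (HVc : ∀ p ∈ V, ∀ r, Adj board₀ p r → r ∈ V)
    (hs : s ∈ gridF) (HsV : s ∉ V)
    (HB : WfB board') (H1 : WfB vis) (H3 : visF vis = V) :
    (pvBFS board' vis s.1 s.2 is_clear).2.2 =
      (if 3 ≤ (compC board₀ s).card then ((compC board₀ s).card : Int) else 0) ∧
    visF (pvBFS board' vis s.1 s.2 is_clear).2.1 = V ∪ compC board₀ s ∧
    WfB (pvBFS board' vis s.1 s.2 is_clear).2.1 ∧
    WfB (pvBFS board' vis s.1 s.2 is_clear).1 ∧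
    (∀ p ∈ gridF, p ∉ V ∪ compC board₀ s →
      pvGet2 (pvBFS board' vis s.1 s.2 is_clear).1 p.1 p.2 = pvGet2 board₀ p.1 p.2) := by
  have hsb := mem_gridF.mp hs
  have hseta : ((s.1, s.2) : Int × Int) = s := rfl
  have hvis1 : WfB (pvSet2 vis s.1 s.2 1) := WfB_pvSet2 H1 hsb.1 hsb.2.1 hsb.2.2.1 1
  have hvisF1 : visF (pvSet2 vis s.1 s.2 1) = V ∪ ([s] : List (Int × Int)).toFinset := by
    rw [show visF (pvSet2 vis s.1 s.2 1) = insert s (visF vis) from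
      hseta ▸ visF_pvSet2_one H1 hs, H3]
    ext y
    simp [Finset.mem_insert, Or.comm]
  have hadd : PySem.Set.add (PySem.Set.empty : PySem.Set (Int × Int)) (s.1, s.2) = [s] := by
    rw [show (PySem.Set.empty : PySem.Set (Int × Int)) = [] from rfl,
      set_add_of_not_mem List.not_mem_nil, hseta]
    rfl
  have hloop := bfsLoop_spec H2 H7 HVc hs HsV 1000 (pvSet2 vis s.1 s.2 1) [s] [s] (0 + 1)
    hvis1 hvisF1
    (fun x hx => by rw [List.mem_singleton.mp hx]; exact mem_comp_self s)
    List.mem_cons_self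
    (fun x hx => hx)
    (List.nodup_cons.mpr ⟨List.not_mem_nil, List.nodup_nil⟩)
    (List.nodup_cons.mpr ⟨List.not_mem_nil, List.nodup_nil⟩)
    (fun p hp hpq => absurd hp hpq)
    (by norm_num)
    (by
      have := card_visF_le (pvSet2 vis s.1 s.2 1)
      simp only [List.length_cons, List.length_nil]
      omega)
  set r := pvBfsLoop board' 1000 (pvSet2 vis s.1 s.2 1) [s] [s] (0 + 1) with hr
  obtain ⟨hposF, hcnt, hvisF', hwf'⟩ := hloop
  have hBFSred : pvBFS board' vis s.1 s.2 is_clear =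
      (if r.2.2 ≥ 3 then
        (if is_clear then r.2.1.foldl (fun b (p : Int × Int) => pvSet2 b p.1 p.2 0) board'
          else board', r.1, r.2.2)
      else (board', r.1, 0)) := by
    simp only [pvBFS, hadd, hseta, List.nil_append]
    rw [← hr]
  have hcast : (3 : Int) ≤ ((compC board₀ s).card : Int) ↔ 3 ≤ (compC board₀ s).card := by
    exact_mod_cast Iff.rfl
  have hposg : ∀ x ∈ r.2.1, x ∈ gridF := by
    intro x hx
    have : x ∈ compC board₀ s := hposF ▸ List.mem_toFinset.mpr hx
    exact comp_subset_grid hs this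
  by_cases hbig : 3 ≤ (compC board₀ s).card
  · have hge : r.2.2 ≥ 3 := by rw [hcnt]; exact_mod_cast hbig
    rw [hBFSred, if_pos hge]
    refine ⟨by rw [hcnt, if_pos hbig], hvisF', hwf', ?_, ?_⟩
    · by_cases hic : is_clear = true
      · simp only [hic, if_pos]
        exact (clear_fold_agree hposg board' HB).1
      · simp only [if_neg hic]
        exact HB
    · intro p hp hpV
      have hpnotpos : p ∉ r.2.1 := by
        intro hmem
        exact hpV (Finset.mem_union_right _ (hposF ▸ List.mem_toFinset.mpr hmem))
      have hpnotV : p ∉ V := fun h => hpV (Finset.mem_union_left _ h)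
      by_cases hic : is_clear = true
      · rw [if_pos hic, (clear_fold_agree hposg board' HB).2 p hp hpnotpos]
        exact H2 p hp hpnotV
      · rw [if_neg hic]
        exact H2 p hp hpnotV
  · have hlt : ¬ r.2.2 ≥ 3 := by
      rw [hcnt]
      intro h
      exact hbig (by exact_mod_cast h)
    rw [hBFSred, if_neg hlt]
    refine ⟨by rw [if_neg hbig], hvisF', hwf', HB, ?_⟩
    intro p hp hpV
    exact H2 p hp (fun h => hpV (Finset.mem_union_left _ h))


theorem sum_comp {board₀ : List (List Int)} {s : Int × Int} (hs : s ∈ gridF) :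
    ∑ q ∈ compC board₀ s, indC board₀ q =
      (if 3 ≤ (compC board₀ s).card then ((compC board₀ s).card : Int) else 0) := by
  have hconst : ∀ q ∈ compC board₀ s, indC board₀ q = indC board₀ s := by
    intro q hq
    unfold indC
    rw [comp_eq_of_mem hs hq]
  rw [Finset.sum_congr rfl hconst, Finset.sum_const]
  unfold indC
  split_ifs with h
  · rw [nsmul_eq_mul, mul_one]
  · rw [smul_zero]

-- one cell of A's outer scan (proof-layer name for the fold body of count_clear)
def outerStep (is_clear : Bool) (st : List (List Int) × List (List Int) × Int)
    (p : Int × Int) : List (List Int) × List (List Int) × Int :=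
  if pvGet2 st.2.1 p.1 p.2 = 0 then
    (let r := pvBFS st.1 st.2.1 p.1 p.2 is_clear
     (r.1, r.2.1, st.2.2 + r.2.2))
  else st

theorem foldl_nested {σ : Type} (f : σ → Int → Int → σ) (init : σ) :
    (PySem.List.pyRange 0 5 1).foldl
      (fun st i => (PySem.List.pyRange 0 5 1).foldl (fun st j => f st i j) st) init =
    gridList.foldl (fun st p => f st p.1 p.2) init := by
  rw [show PySem.List.pyRange 0 5 1 = [0, 1, 2, 3, 4] from by decide]
  simp only [List.foldl_cons, List.foldl_nil, gridList]

theorem outer_fold_spec {board₀ : List (List Int)} (is_clear : Bool) :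
    ∀ starts : List (Int × Int), (∀ x ∈ starts, x ∈ gridF) →
    ∀ (b vis : List (List Int)) (cnt : Int) (V : Finset (Int × Int)),
    WfB b → WfB vis → visF vis = V → V ⊆ gridF →
    (∀ p ∈ V, ∀ r, Adj board₀ p r → r ∈ V) →
    (∀ p ∈ gridF, p ∉ V → pvGet2 b p.1 p.2 = pvGet2 board₀ p.1 p.2) →
    cnt = ∑ q ∈ V, indC board₀ q →
    ∃ V' : Finset (Int × Int),
      (starts.foldl (outerStep is_clear) (b, vis, cnt)).2.2 = ∑ q ∈ V', indC board₀ q ∧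
      V ⊆ V' ∧ V' ⊆ gridF ∧ (∀ x ∈ starts, x ∈ V') := by
  intro starts
  induction starts with
  | nil =>
    intro _ b vis cnt V _ _ _ h7 _ _ hcnt
    exact ⟨V, hcnt, subset_rfl, h7, by simp⟩
  | cons s rest ih =>
    intro hst b vis cnt V hb hv h3 h7 hVc hag hcnt
    have hsg : s ∈ gridF := hst s List.mem_cons_self
    have hrest : ∀ x ∈ rest, x ∈ gridF := fun x hx => hst x (List.mem_cons_of_mem s hx)
    by_cases hsV : s ∈ V
    · have hguard : ¬ pvGet2 vis s.1 s.2 = 0 := by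
        rw [← h3] at hsV
        exact (mem_visF.mp hsV).2
      have hstep : outerStep is_clear (b, vis, cnt) s = (b, vis, cnt) := by
        simp only [outerStep]
        rw [if_neg hguard]
      rw [List.foldl_cons, hstep]
      obtain ⟨V', h1, h2, h3', h4⟩ := ih hrest b vis cnt V hb hv h3 h7 hVc hag hcnt
      refine ⟨V', h1, h2, h3', fun x hx => ?_⟩
      rcases List.mem_cons.mp hx with rfl | hx
      · exact h2 hsV
      · exact h4 x hx
    · have hguard : pvGet2 vis s.1 s.2 = 0 := by
        by_contra hne
        exact hsV (h3 ▸ mem_visF.mpr ⟨hsg, hne⟩)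
      have hstep : outerStep is_clear (b, vis, cnt) s =
          ((pvBFS b vis s.1 s.2 is_clear).1, (pvBFS b vis s.1 s.2 is_clear).2.1,
            cnt + (pvBFS b vis s.1 s.2 is_clear).2.2) := by
        simp only [outerStep]
        rw [if_pos hguard]
      obtain ⟨hc1, hc2, hc3, hc4, hc5⟩ :=
        pvBFS_spec (is_clear := is_clear) hag h7 hVc hsg hsV hb hv h3
      have hdisj : Disjoint V (compC board₀ s) := by
        rw [Finset.disjoint_right]
        intro a ha
        exact comp_disj_V hVc hsg hsV a ha
      rw [List.foldl_cons, hstep]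
      obtain ⟨V', h1, h2, h3', h4⟩ := ih hrest (pvBFS b vis s.1 s.2 is_clear).1
        (pvBFS b vis s.1 s.2 is_clear).2.1 (cnt + (pvBFS b vis s.1 s.2 is_clear).2.2)
        (V ∪ compC board₀ s) hc4 hc3 hc2
        (Finset.union_subset h7 (comp_subset_grid hsg))
        (by
          intro p hp r ha
          rcases Finset.mem_union.mp hp with hp | hp
          · exact Finset.mem_union_left _ (hVc p hp r ha)
          · exact Finset.mem_union_right _ (adj_mem_comp hsg hp ha))
        hc5
        (by rw [hcnt, hc1, Finset.sum_union hdisj, sum_comp hsg])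
      refine ⟨V', h1, Finset.subset_union_left.trans h2, h3', fun x hx => ?_⟩
      rcases List.mem_cons.mp hx with rfl | hx
      · exact h2 (Finset.mem_union_right _ (mem_comp_self x))
      · exact h4 x hx

theorem Pre_WfB {board : List (List Int)} {is_clear : Bool}
    (h : Pre_count_clear board is_clear) : WfB board := by
  obtain ⟨hlen, hrows⟩ := h
  refine ⟨hlen, fun k hk => ?_⟩
  have hk5 : k < (board.take 5).length := by
    rw [List.length_take]
    omega
  have heq : board.getD k [] = (board.take 5)[k] := by
    rw [List.getD_eq_getElem _ _ (by omega)]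
    simp [List.getElem_take]
  rw [heq]
  exact hrows _ (List.getElem_mem hk5)

theorem wf_vis0 : WfB (List.replicate 5 (List.replicate 5 (0 : Int))) := by
  refine ⟨by simp, fun k hk => ?_⟩
  rw [List.getD_eq_getElem _ _ (by simp; omega), List.getElem_replicate]
  simp

theorem visF_vis0 : visF (List.replicate 5 (List.replicate 5 (0 : Int))) = ∅ := by
  ext p
  simp only [mem_visF]
  constructor
  · rintro ⟨hp, hne⟩
    exfalso
    apply hne
    have hpb := mem_gridF.mp hp
    rw [pvGet2_eq_getD hpb.1 hpb.2.1 hpb.2.2.1 (by simp),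
      List.getD_eq_getElem (List.replicate 5 (List.replicate 5 (0 : Int))) []
        (by simp; omega), List.getElem_replicate,
      List.getD_eq_getElem (List.replicate 5 (0 : Int)) 0 (by simp; omega),
      List.getElem_replicate]
  · intro hmem
    exact (Finset.notMem_empty p hmem).elim

theorem mem_gridList_iff {x : Int × Int} : x ∈ gridList ↔ x ∈ gridF := by
  rw [← gridList_toFinset, List.mem_toFinset]

theorem countA (board : List (List Int)) (is_clear : Bool)
    (h : Pre_count_clear board is_clear) :
    count_clear board is_clear = countSpec board := by
  have hwfb := Pre_WfB h
  have hred : count_clear board is_clear =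
      (gridList.foldl (outerStep is_clear)
        (board, List.replicate 5 (List.replicate 5 (0 : Int)), 0)).2.2 := by
    simp only [count_clear]
    rw [foldl_nested (fun st i j => if pvGet2 st.2.1 i j = 0 then
      (let r := pvBFS st.1 st.2.1 i j is_clear; (r.1, r.2.1, st.2.2 + r.2.2)) else st),
      show (fun (st : List (List Int) × List (List Int) × Int) (p : Int × Int) =>
        if pvGet2 st.2.1 p.1 p.2 = 0 then
          (let r := pvBFS st.1 st.2.1 p.1 p.2 is_clear; (r.1, r.2.1, st.2.2 + r.2.2))
        else st) = outerStep is_clear from rfl]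
  obtain ⟨V', h1, _, h3, h4⟩ := outer_fold_spec (board₀ := board) is_clear gridList
    (fun x hx => mem_gridList_iff.mp hx)
    board (List.replicate 5 (List.replicate 5 (0 : Int))) 0 ∅
    hwfb wf_vis0 visF_vis0 (by simp) (by simp) (fun p hp _ => rfl) (by simp)
  have hV'g : V' = gridF :=
    Finset.Subset.antisymm h3 (fun x hx => h4 x (mem_gridList_iff.mpr hx))
  rw [hred, h1, hV'g, countSpec]


-- ---------- B side: min-label propagation computes mlab ∘ compC ----------

def idxP (p : Int × Int) : Int := 5 * p.1 + p.2

def mlab (S : Finset (Int × Int)) : Int := WithTop.untopD 0 (S.image idxP).min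

def labF (board : List (List Int)) (t : Nat) (p : Int × Int) : Int :=
  mlab ((Sat board)^[t] {p})

def nbrsOK (board : List (List Int)) (p : Int × Int) : List (Int × Int) :=
  (pvNbrs p.1 p.2).filter (fun x => decide (0 ≤ x.1 ∧ x.1 < 5 ∧ 0 ≤ x.2 ∧ x.2 < 5 ∧
    pvGet2 board p.1 p.2 = pvGet2 board x.1 x.2))

theorem iter_nonempty {board : List (List Int)} (t : Nat) (p : Int × Int) :
    ((Sat board)^[t] ({p} : Finset (Int × Int))).Nonempty :=
  ⟨p, subset_iter t (Finset.mem_singleton_self p)⟩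

theorem mlab_singleton (p : Int × Int) : mlab {p} = idxP p := by
  rw [mlab, Finset.image_singleton, Finset.min_singleton]
  rfl

theorem mlab_le {S : Finset (Int × Int)} {p : Int × Int} (hS : S.Nonempty) (hp : p ∈ S) :
    mlab S ≤ idxP p := by
  obtain ⟨a, ha⟩ := Finset.min_of_nonempty (hS.image idxP)
  have hle := Finset.min_le (Finset.mem_image_of_mem idxP hp)
  rw [ha] at hle
  rw [mlab, ha]
  exact WithTop.coe_le_coe.mp hle

theorem mlab_mem {S : Finset (Int × Int)} (h : S.Nonempty) : ∃ p ∈ S, idxP p = mlab S := by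
  obtain ⟨a, ha⟩ := Finset.min_of_nonempty (h.image idxP)
  obtain ⟨p, hp, hpa⟩ := Finset.mem_image.mp (Finset.mem_of_min ha)
  refine ⟨p, hp, ?_⟩
  rw [mlab, ha, hpa]
  rfl

theorem mlab_union {A B : Finset (Int × Int)} (hA : A.Nonempty) (hB : B.Nonempty) :
    mlab (A ∪ B) = min (mlab A) (mlab B) := by
  have hAB : (A ∪ B).Nonempty := hA.mono Finset.subset_union_left
  have h1 : mlab (A ∪ B) ≤ mlab A := by
    obtain ⟨p, hp, hip⟩ := mlab_mem hA
    rw [← hip]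
    exact mlab_le hAB (Finset.mem_union_left _ hp)
  have h2 : mlab (A ∪ B) ≤ mlab B := by
    obtain ⟨p, hp, hip⟩ := mlab_mem hB
    rw [← hip]
    exact mlab_le hAB (Finset.mem_union_right _ hp)
  obtain ⟨m, hm, him⟩ := mlab_mem hAB
  rcases Finset.mem_union.mp hm with hmA | hmB
  · have h3 : mlab A ≤ mlab (A ∪ B) := him ▸ mlab_le hA hmA
    exact le_antisymm (le_min h1 h2) ((min_le_left _ _).trans h3)
  · have h3 : mlab B ≤ mlab (A ∪ B) := him ▸ mlab_le hB hmB
    exact le_antisymm (le_min h1 h2) ((min_le_right _ _).trans h3)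

theorem mem_nbrsOK {board : List (List Int)} {p x : Int × Int} (hp : p ∈ gridF) :
    x ∈ nbrsOK board p ↔ Adj board p x := by
  rw [nbrsOK, List.mem_filter, decide_eq_true_eq]
  constructor
  · rintro ⟨hmem, h1, h2, h3, h4, h5⟩
    exact ⟨hp, mem_gridF.mpr ⟨h1, h2, h3, h4⟩, hmem, h5⟩
  · rintro ⟨_, hxg, hmem, hval⟩
    have hxb := mem_gridF.mp hxg
    exact ⟨hmem, hxb.1, hxb.2.1, hxb.2.2.1, hxb.2.2.2, hval⟩

theorem Sat_singleton {board : List (List Int)} {p : Int × Int} (hp : p ∈ gridF) :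
    Sat board {p} = {p} ∪ (nbrsOK board p).toFinset := by
  ext x
  rw [mem_Sat]
  simp only [Finset.mem_union, Finset.mem_singleton, List.mem_toFinset, mem_nbrsOK hp,
    exists_eq_left]
  constructor
  · rintro (rfl | ⟨hg, ha⟩)
    · exact Or.inl rfl
    · exact Or.inr ha
  · rintro (rfl | ha)
    · exact Or.inl rfl
    · exact Or.inr ⟨ha.2.1, ha⟩

theorem iter_union {board : List (List Int)} (t : Nat) (A B : Finset (Int × Int)) :
    (Sat board)^[t] (A ∪ B) = (Sat board)^[t] A ∪ (Sat board)^[t] B := by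
  induction t generalizing A B with
  | zero => rfl
  | succ t ih =>
    rw [Function.iterate_succ_apply, Function.iterate_succ_apply,
      Function.iterate_succ_apply, Sat_union, ih]

theorem iter_fold_union {board : List (List Int)} (t : Nat) :
    ∀ (l : List (Int × Int)) (S : Finset (Int × Int)),
    (Sat board)^[t] (S ∪ l.toFinset) =
      l.foldl (fun T q => T ∪ (Sat board)^[t] ({q} : Finset (Int × Int)))
        ((Sat board)^[t] S) := by
  intro l
  induction l with
  | nil => intro S; simp
  | cons q l ih =>
    intro S
    have h1 : S ∪ (q :: l).toFinset = (S ∪ {q}) ∪ l.toFinset := by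
      ext y
      simp only [Finset.mem_union, List.toFinset_cons, Finset.mem_insert,
        Finset.mem_singleton, List.mem_toFinset]
      tauto
    rw [h1, ih (S ∪ {q}), List.foldl_cons, iter_union]

theorem mlab_fold_union {board : List (List Int)} (t : Nat) :
    ∀ (l : List (Int × Int)) (S : Finset (Int × Int)), S.Nonempty →
    mlab (l.foldl (fun T q => T ∪ (Sat board)^[t] ({q} : Finset (Int × Int))) S) =
      l.foldl (fun m q => min m (labF board t q)) (mlab S) := by
  intro l
  induction l with
  | nil => intro S _; rfl
  | cons q l ih =>
    intro S hS
    rw [List.foldl_cons, List.foldl_cons,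
      ih (S ∪ (Sat board)^[t] {q}) (hS.mono Finset.subset_union_left),
      mlab_union hS (iter_nonempty t q)]
    rfl

theorem labF_succ {board : List (List Int)} {p : Int × Int} (hp : p ∈ gridF) (t : Nat) :
    labF board (t + 1) p =
      (nbrsOK board p).foldl (fun m q => min m (labF board t q)) (labF board t p) := by
  have hdecomp : (Sat board)^[t + 1] ({p} : Finset (Int × Int)) =
      (nbrsOK board p).foldl (fun T q => T ∪ (Sat board)^[t] ({q} : Finset (Int × Int)))
        ((Sat board)^[t] {p}) := by
    rw [Function.iterate_succ_apply, Sat_singleton hp, iter_fold_union]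
  rw [labF, hdecomp, mlab_fold_union t _ _ (iter_nonempty t p)]
  rfl

theorem propCell_eq {board : List (List Int)} {lab : List Int} {t : Nat} {p : Int × Int}
    (hp : p ∈ gridF)
    (hlab : ∀ q ∈ gridList, PySem.List.pyGetD lab (5 * q.1 + q.2) 0 = labF board t q) :
    pvPropCell board lab p.1 p.2 = labF board (t + 1) p := by
  rw [labF_succ hp t, nbrsOK, List.foldl_filter, pvPropCell,
    hlab p (mem_gridList_iff.mpr hp)]
  apply PySem.List.foldl_congr_mem
  intro m x _
  by_cases hg : 0 ≤ x.1 ∧ x.1 < 5 ∧ 0 ≤ x.2 ∧ x.2 < 5 ∧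
      pvGet2 board p.1 p.2 = pvGet2 board x.1 x.2
  · rw [if_pos hg, if_pos (by simpa using hg)]
    have hxg : x ∈ gridF := mem_gridF.mpr ⟨hg.1, hg.2.1, hg.2.2.1, hg.2.2.2.1⟩
    rw [hlab x (mem_gridList_iff.mpr hxg)]
  · rw [if_neg hg, if_neg (by simpa using hg)]

theorem propagate_eq_map (board : List (List Int)) (lab : List Int) :
    pvPropagate board lab = gridList.map (fun p => pvPropCell board lab p.1 p.2) := by
  rw [pvPropagate, show PySem.List.pyRange 0 5 1 = [0, 1, 2, 3, 4] from by decide]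
  simp only [List.foldl_cons, List.foldl_nil, PySem.List.foldl_append_singleton_eq_map,
    gridList, List.map_cons, List.map_nil, List.nil_append, List.cons_append,
    List.append_nil]

theorem gridList_get_idx : ∀ p ∈ gridList, gridList[(5 * p.1 + p.2).toNat]? = some p := by
  decide

theorem pyGetD_map_gridList (f : Int × Int → Int) {p : Int × Int} (hp : p ∈ gridList) :
    PySem.List.pyGetD (gridList.map f) (5 * p.1 + p.2) 0 = f p := by
  have hb := mem_gridF.mp (mem_gridList_iff.mp hp)
  have hlt : 5 * p.1 + p.2 < ((gridList.map f).length : Int) := by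
    rw [List.length_map, show gridList.length = 25 from rfl]
    push_cast
    omega
  rw [PySem.List.pyGetD_eq_getElem _ _ (by omega) hlt, List.getElem_map]
  obtain ⟨hlt2, heq⟩ := List.getElem?_eq_some_iff.mp (gridList_get_idx p hp)
  exact congrArg f heq

theorem foldl_const_iterate {α β : Type} (g : α → α) :
    ∀ (l : List β) (init : α), l.foldl (fun a _ => g a) init = g^[l.length] init := by
  intro l
  induction l with
  | nil => intro init; rfl
  | cons x l ih =>
    intro init
    rw [List.foldl_cons, ih, List.length_cons, Function.iterate_succ_apply]

theorem labels_inv (board : List (List Int)) : ∀ t : Nat, ∀ q ∈ gridList,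
    PySem.List.pyGetD ((pvPropagate board)^[t] (PySem.List.pyRange 0 25 1))
      (5 * q.1 + q.2) 0 = labF board t q := by
  intro t
  induction t with
  | zero =>
    have hbase : ∀ q ∈ gridList,
        PySem.List.pyGetD (PySem.List.pyRange 0 25 1) (5 * q.1 + q.2) 0 = 5 * q.1 + q.2 := by
      decide
    intro q hq
    rw [Function.iterate_zero_apply, hbase q hq, labF, Function.iterate_zero_apply,
      mlab_singleton]
    rfl
  | succ t ih =>
    intro q hq
    rw [Function.iterate_succ_apply', propagate_eq_map, pyGetD_map_gridList _ hq,
      propCell_eq (mem_gridList_iff.mp hq) ih]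

theorem labels_eq_map (board : List (List Int)) :
    pvLabels board = gridList.map (labF board 25) := by
  rw [pvLabels, foldl_const_iterate, show (PySem.List.pyRange 0 25 1).length = 25 from by decide,
    show (25 : Nat) = 24 + 1 from rfl, Function.iterate_succ_apply', propagate_eq_map]
  apply List.map_congr_left
  intro q hq
  exact propCell_eq (mem_gridList_iff.mp hq) (labels_inv board 24)

theorem idx_inj {p q : Int × Int} (hp : p ∈ gridF) (hq : q ∈ gridF)
    (h : idxP p = idxP q) : p = q := by
  have hpb := mem_gridF.mp hp
  have hqb := mem_gridF.mp hq
  rw [idxP, idxP] at h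
  obtain ⟨a, b⟩ := p; obtain ⟨c, d⟩ := q
  simp only at h hpb hqb
  rw [Prod.ext_iff]
  constructor <;> (simp only []; omega)

theorem labF25_eq_iff {board : List (List Int)} {p q : Int × Int}
    (hp : p ∈ gridF) (hq : q ∈ gridF) :
    labF board 25 q = labF board 25 p ↔ q ∈ compC board p := by
  constructor
  · intro h
    obtain ⟨m, hm, hmi⟩ := mlab_mem (⟨q, mem_comp_self q⟩ : (compC board q).Nonempty)
    obtain ⟨m', hm', hmi'⟩ := mlab_mem (⟨p, mem_comp_self p⟩ : (compC board p).Nonempty)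
    have hmm : m = m' := by
      apply idx_inj (comp_subset_grid hq hm) (comp_subset_grid hp hm')
      rw [hmi, hmi']
      exact h
    subst hmm
    have h1 : compC board m = compC board q := comp_eq_of_mem hq hm
    have h2 : compC board m = compC board p := comp_eq_of_mem hp hm'
    have hqq : q ∈ compC board q := mem_comp_self q
    rw [← h1, h2] at hqq
    exact hqq
  · intro h
    exact congrArg mlab (comp_eq_of_mem hp h)

theorem countP_toFinset {α : Type} [DecidableEq α] (P : α → Bool) {l : List α}
    (hl : l.Nodup) : l.countP P = (l.toFinset.filter (fun a => P a = true)).card := by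
  rw [List.countP_eq_length_filter, ← List.toFinset_card_of_nodup (hl.filter _),
    List.toFinset_filter]

theorem count_label {board : List (List Int)} {p : Int × Int} (hp : p ∈ gridF) :
    (pvLabels board).count (labF board 25 p) = (compC board p).card := by
  rw [labels_eq_map, List.count_eq_countP, List.countP_map,
    countP_toFinset _ gridList_nodup]
  refine congrArg Finset.card ?_
  ext q
  rw [Finset.mem_filter, List.mem_toFinset, mem_gridList_iff]
  constructor
  · rintro ⟨hqg, hbeq⟩
    have hb : labF board 25 q = labF board 25 p := by
      simpa using hbeq
    exact (labF25_eq_iff hp hqg).mp hb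
  · intro hq
    have hqg : q ∈ gridF := comp_subset_grid hp hq
    refine ⟨hqg, ?_⟩
    simpa using (labF25_eq_iff hp hqg).mpr hq

theorem size_getD {board : List (List Int)} {p : Int × Int} (hp : p ∈ gridF) :
    ((pvLabels board).foldl (fun (d : PySem.Dict Int Int) l => d.insert l (d.getD l 0 + 1))
      PySem.Dict.empty).getD (labF board 25 p) 0 = ((compC board p).card : Int) := by
  rw [PySem.Dict.getD_foldl_insert_add_one, PySem.Dict.getD_empty, zero_add, count_label hp]

theorem altB_fold {board : List (List Int)} (is_clear : Bool) :
    ∀ l : List (Int × Int), (∀ x ∈ l, x ∈ gridF) →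
    ∀ (b : List (List Int)) (total : Int),
    (l.foldl (fun (st : List (List Int) × Int) (p : Int × Int) =>
      if ((pvLabels board).foldl
            (fun (d : PySem.Dict Int Int) l' => d.insert l' (d.getD l' 0 + 1))
            PySem.Dict.empty).getD
          (PySem.List.pyGetD (pvLabels board) (5 * p.1 + p.2) 0) 0 ≥ 3 then
        ((if is_clear then pvSet2 st.1 p.1 p.2 0 else st.1), st.2 + 1)
      else st) (b, total)).2 = total + (l.map (indC board)).sum := by
  intro l
  induction l with
  | nil => intro _ b total; simp
  | cons p rest ih =>
    intro hl b total
    have hpg : p ∈ gridF := hl p List.mem_cons_self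
    have hrest : ∀ x ∈ rest, x ∈ gridF := fun x hx => hl x (List.mem_cons_of_mem p hx)
    have hlabel : PySem.List.pyGetD (pvLabels board) (5 * p.1 + p.2) 0 = labF board 25 p := by
      rw [labels_eq_map]
      exact pyGetD_map_gridList _ (mem_gridList_iff.mpr hpg)
    have hcond : (((pvLabels board).foldl
        (fun (d : PySem.Dict Int Int) l' => d.insert l' (d.getD l' 0 + 1))
        PySem.Dict.empty).getD
          (PySem.List.pyGetD (pvLabels board) (5 * p.1 + p.2) 0) 0 ≥ 3) ↔
        3 ≤ (compC board p).card := by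
      rw [hlabel, size_getD hpg]
      constructor
      · intro h; exact_mod_cast h
      · intro h; exact_mod_cast h
    rw [List.foldl_cons, List.map_cons, List.sum_cons]
    by_cases hbig : 3 ≤ (compC board p).card
    · rw [if_pos (hcond.mpr hbig), ih hrest _ (total + 1),
        show indC board p = 1 from by rw [indC, if_pos hbig]]
      ring
    · rw [if_neg (fun h => hbig (hcond.mp h)), ih hrest b total,
        show indC board p = 0 from by rw [indC, if_neg hbig]]
      ring

theorem countB (board : List (List Int)) (is_clear : Bool) :
    count_clear_alt board is_clear = countSpec board := by
  have hred : count_clear_alt board is_clear =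
      (gridList.foldl (fun (st : List (List Int) × Int) (p : Int × Int) =>
        if ((pvLabels board).foldl
              (fun (d : PySem.Dict Int Int) l' => d.insert l' (d.getD l' 0 + 1))
              PySem.Dict.empty).getD
            (PySem.List.pyGetD (pvLabels board) (5 * p.1 + p.2) 0) 0 ≥ 3 then
          ((if is_clear then pvSet2 st.1 p.1 p.2 0 else st.1), st.2 + 1)
        else st) (board, (0 : Int))).2 := by
    simp only [count_clear_alt]
    rw [foldl_nested (fun (st : List (List Int) × Int) r c =>
      if ((pvLabels board).foldl
            (fun (d : PySem.Dict Int Int) l' => d.insert l' (d.getD l' 0 + 1))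
            PySem.Dict.empty).getD
          (PySem.List.pyGetD (pvLabels board) (5 * r + c) 0) 0 ≥ 3 then
        ((if is_clear then pvSet2 st.1 r c 0 else st.1), st.2 + 1)
      else st)]
  rw [hred, altB_fold is_clear gridList (fun x hx => mem_gridList_iff.mp hx) board 0, zero_add,
    countSpec, ← gridList_toFinset, List.sum_toFinset _ gridList_nodup]

-- ===== VERDICT (by name: the statement is the Claim_ definition above) =====
theorem count_clear_spec : Claim_equal_count_clear := by
  intro board is_clear _ hpre
  unfold Spec_count_clear
  rw [countA board is_clear hpre, countB board is_clear]
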